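-- pv_equiv track=rewrite | github.com/damidina/virtualOS | virtualOSRemoteMac/HostRuntime/server.py | project_point_to_active_display
-- ===== SOURCE A (Python) =====
-- def clamp_int(value: int, lo: int, hi: int) -> int:
--     return max(lo, min(hi, value))
--
-- def point_in_rect(x: int, y: int, rect: tuple[int, int, int, int]) -> bool:
--     rx, ry, rw, rh = rect
--     return rx <= x <= (rx + rw - 1) and ry <= y <= (ry + rh - 1)
--
-- def project_point_to_rect(x: int, y: int, rect: tuple[int, int, int, int]) -> tuple[int, int]:
--     rx, ry, rw, rh = rect
--     px = clamp_int(x, rx, rx + rw - 1)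
--     py = clamp_int(y, ry, ry + rh - 1)
--     return px, py
--
-- def project_point_to_active_display(x: int, y: int, rects: list[tuple[int, int, int, int]]) -> tuple[int, int, bool]:
--     for rect in rects:
--         if point_in_rect(x, y, rect):
--             return x, y, False
--
--     best = (x, y)
--     best_dist2 = None
--     for rect in rects:
--         px, py = project_point_to_rect(x, y, rect)
--         dx = px - x
--         dy = py - y
--         dist2 = dx * dx + dy * dy
--         if best_dist2 is None or dist2 < best_dist2:
--             best = (px, py)
--             best_dist2 = dist2
--     return best[0], best[1], True
-- ===== SOURCE B (Python) =====
-- def project_point_to_active_display(x: int, y: int, rects: list[tuple[int, int, int, int]]) -> tuple[int, int, bool]: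
--     # Single fused pass: containment check and nearest-projection tracking in one loop.
--     best = (x, y)
--     best_d = None
--     for rx, ry, rw, rh in rects:
--         hx = rx + rw - 1
--         hy = ry + rh - 1
--         if rx <= x <= hx and ry <= y <= hy:
--             return x, y, False
--         px = max(rx, min(hx, x))
--         py = max(ry, min(hy, y))
--         d = (px - x) ** 2 + (py - y) ** 2
--         if best_d is None or d < best_d:
--             best = (px, py)
--             best_d = d
--     return best[0], best[1], True
-- ===== Notes on version B (the rewrite author's own statement) =====
-- stated objective: simpler
-- what changed: Replaces A's two sequential scans (a containment pass, then a nearest-projection pass) by one fused loop that returns early on containment and otherwise tracks the first-minimum projection.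
import Mathlib
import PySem

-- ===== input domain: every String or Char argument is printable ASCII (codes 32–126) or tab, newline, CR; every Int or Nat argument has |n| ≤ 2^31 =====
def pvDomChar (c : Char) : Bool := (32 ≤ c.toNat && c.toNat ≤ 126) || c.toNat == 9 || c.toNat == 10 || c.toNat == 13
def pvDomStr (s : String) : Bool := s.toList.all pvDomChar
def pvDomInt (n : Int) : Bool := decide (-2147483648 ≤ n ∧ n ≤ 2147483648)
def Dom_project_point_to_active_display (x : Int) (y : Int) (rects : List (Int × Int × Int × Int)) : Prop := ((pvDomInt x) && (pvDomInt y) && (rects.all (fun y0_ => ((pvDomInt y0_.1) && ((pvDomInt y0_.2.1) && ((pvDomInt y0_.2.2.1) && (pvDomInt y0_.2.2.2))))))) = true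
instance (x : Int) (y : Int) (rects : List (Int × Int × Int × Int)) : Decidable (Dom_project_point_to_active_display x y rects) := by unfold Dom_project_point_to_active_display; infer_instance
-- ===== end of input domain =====

-- B fuses A's two scans (containment pass, then nearest-projection pass) into one loop with an early return; equal on all inputs.


-- ===== PORT A =====
def clampInt (value lo hi : Int) : Int := max lo (min hi value)

def pointInRect (x y : Int) (rect : Int × Int × Int × Int) : Bool :=
  decide ((rect.1 ≤ x ∧ x ≤ rect.1 + rect.2.2.1 - 1) ∧ (rect.2.1 ≤ y ∧ y ≤ rect.2.1 + rect.2.2.2 - 1))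

def projectPointToRect (x y : Int) (rect : Int × Int × Int × Int) : Int × Int :=
  (clampInt x rect.1 (rect.1 + rect.2.2.1 - 1), clampInt y rect.2.1 (rect.2.1 + rect.2.2.2 - 1))

-- A's first loop: return (x, y, False) at the first containing rect
def aLoop1 (x y : Int) : List (Int × Int × Int × Int) → Option (Int × Int × Bool)
  | [] => none
  | r :: rs => if pointInRect x y r then some (x, y, false) else aLoop1 x y rs

-- A's second loop: first-minimum projection
def aLoop2 (x y : Int) (best : Int × Int) (bestD : Option Int) : List (Int × Int × Int × Int) → Int × Int
  | [] => best
  | r :: rs =>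
    let p := projectPointToRect x y r
    let dx := p.1 - x
    let dy := p.2 - y
    let d := dx * dx + dy * dy
    match bestD with
    | none => aLoop2 x y p (some d) rs
    | some bd => if d < bd then aLoop2 x y p (some d) rs else aLoop2 x y best (some bd) rs

def project_point_to_active_display (x : Int) (y : Int) (rects : List (Int × Int × Int × Int)) : Int × Int × Bool :=
  match aLoop1 x y rects with
  | some res => res
  | none =>
    let b := aLoop2 x y (x, y) none rects
    (b.1, b.2, true)

-- ===== PORT B =====
def bLoop (x y : Int) (best : Int × Int) (bestD : Option Int) : List (Int × Int × Int × Int) → Int × Int × Bool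
  | [] => (best.1, best.2, true)
  | (rx, ry, rw, rh) :: rs =>
    let hx := rx + rw - 1
    let hy := ry + rh - 1
    if (rx ≤ x ∧ x ≤ hx) ∧ (ry ≤ y ∧ y ≤ hy) then (x, y, false)
    else
      let px := max rx (min hx x)
      let py := max ry (min hy y)
      let d := (px - x) ^ 2 + (py - y) ^ 2
      match bestD with
      | none => bLoop x y (px, py) (some d) rs
      | some bd => if d < bd then bLoop x y (px, py) (some d) rs else bLoop x y best (some bd) rs

def project_point_to_active_display_alt (x : Int) (y : Int) (rects : List (Int × Int × Int × Int)) : Int × Int × Bool :=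
  bLoop x y (x, y) none rects

-- ===== PRECONDITION & SPEC =====
def Spec_project_point_to_active_display (x : Int) (y : Int) (rects : List (Int × Int × Int × Int)) (out : Int × Int × Bool) : Prop := out = project_point_to_active_display_alt x y rects
instance (x : Int) (y : Int) (rects : List (Int × Int × Int × Int)) (out : Int × Int × Bool) : Decidable (Spec_project_point_to_active_display x y rects out) := by unfold Spec_project_point_to_active_display; infer_instance

-- ===== CLAIM (what is proved, stated in full; the proofs are below) =====
def Claim_equal_project_point_to_active_display : Prop := ∀ (x : Int) (y : Int) (rects : List (Int × Int × Int × Int)), Dom_project_point_to_active_display x y rects → Spec_project_point_to_active_display x y rects (project_point_to_active_display x y rects)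

-- ===== LEMMAS AND PROOFS =====
theorem bLoop_eq (x y : Int) (rs : List (Int × Int × Int × Int)) :
    ∀ (best : Int × Int) (bestD : Option Int),
      bLoop x y best bestD rs =
        match aLoop1 x y rs with
        | some res => res
        | none => ((aLoop2 x y best bestD rs).1, (aLoop2 x y best bestD rs).2, true) := by
  induction rs with
  | nil => intro best bestD; simp [bLoop, aLoop1, aLoop2]
  | cons r rs ih =>
    intro best bestD
    obtain ⟨rx, ry, rw, rh⟩ := r
    by_cases h : (rx ≤ x ∧ x ≤ rx + rw - 1) ∧ (ry ≤ y ∧ y ≤ ry + rh - 1)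
    · simp [bLoop, aLoop1, pointInRect, h]
    · have hpt : pointInRect x y (rx, ry, rw, rh) = false := by
        simp only [pointInRect, decide_eq_false_iff_not]; exact h
      have hsq : ∀ a : Int, a ^ 2 = a * a := fun a => sq a
      simp only [bLoop, aLoop1, aLoop2, hpt, if_neg h, Bool.false_eq_true, if_false,
        projectPointToRect, clampInt, hsq]
      cases bestD with
      | none => exact ih _ _
      | some bd =>
        by_cases hd : (max rx (min (rx + rw - 1) x) - x) * (max rx (min (rx + rw - 1) x) - x) +
            (max ry (min (ry + rh - 1) y) - y) * (max ry (min (ry + rh - 1) y) - y) < bd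
        · simp only [if_pos hd]; exact ih _ _
        · simp only [if_neg hd]; exact ih _ _

-- ===== VERDICT (by name: the statement is the Claim_ definition above) =====
theorem project_point_to_active_display_spec : Claim_equal_project_point_to_active_display := by
  intro x y rects _
  unfold Spec_project_point_to_active_display project_point_to_active_display project_point_to_active_display_alt
  rw [bLoop_eq]
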